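-- pv_equiv track=rewrite | github.com/BassemMagdi0007/Finding-Optimal-Train-Connections | trainConnections.py | find_start_end_indices
-- ===== SOURCE A (Python) =====
-- def find_start_end_indices(lst):
--     indices = {}
--     for index, elem in enumerate(lst):
--         if elem not in indices:
--             indices[elem] = {'start': index, 'end': index}
--         else:
--             indices[elem]['end'] = index
--     return indices
-- ===== SOURCE B (Python) =====
-- def find_start_end_indices(lst):
--     # Dict-comprehension over the distinct elements (first-occurrence order):
--     # start = first index via lst.index, end = last index via the reversed list.
--     n = len(lst)
--     rev = lst[::-1]
--     return {e: {'start': lst.index(e), 'end': n - 1 - rev.index(e)}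
--             for e in dict.fromkeys(lst)}
-- ===== Notes on version B (the rewrite author's own statement) =====
-- stated objective: alternative
-- what changed: A builds the dict incrementally in one enumerate loop with an if/else per element; B first dedups the list and then computes each element's start as lst.index(e) and end as n-1-reversed(lst).index(e) in a dict comprehension, with no incremental dict updates at all.
import Mathlib
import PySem

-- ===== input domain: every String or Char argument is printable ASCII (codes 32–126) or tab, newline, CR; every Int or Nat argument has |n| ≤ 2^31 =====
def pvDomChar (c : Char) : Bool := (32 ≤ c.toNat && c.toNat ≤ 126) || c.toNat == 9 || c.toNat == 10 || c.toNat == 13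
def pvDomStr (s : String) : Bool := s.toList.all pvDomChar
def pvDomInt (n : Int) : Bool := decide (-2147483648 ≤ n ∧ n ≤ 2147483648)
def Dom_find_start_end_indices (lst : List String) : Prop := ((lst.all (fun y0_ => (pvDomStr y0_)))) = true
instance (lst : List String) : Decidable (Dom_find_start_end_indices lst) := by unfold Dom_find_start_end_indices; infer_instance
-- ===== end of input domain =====

-- B replaces A's single incremental enumerate/if-else loop by a dict comprehension over the
-- deduplicated list, computing start = lst.index(e) and end = n-1-reversed(lst).index(e) (objective: alternative).


-- ===== PORT A =====
-- 'indices[elem]['end'] = index' on a key known present is Dict.modify (default never used).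
def find_start_end_indices (lst : List String) : List (String × List (String × Int)) :=
  (((PySem.List.enumerate lst).foldl
      (fun d p =>
        if !(d.contains p.2) then
          d.insert p.2 ((PySem.Dict.empty.insert "start" p.1).insert "end" p.1)
        else
          d.modify p.2 PySem.Dict.empty (fun v => v.insert "end" p.1))
      (PySem.Dict.empty : PySem.Dict String (PySem.Dict String Int))).items).map
    (fun q => (q.1, q.2.items))

-- ===== PORT B =====
-- dict.fromkeys(lst) as ordered dedup is PySem.List.dedup; lst[::-1] is slice? with step -1;
-- '.index' never raises here (every e comes from lst), so getD 0 is never used.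
def find_start_end_indices_alt (lst : List String) : List (String × List (String × Int)) :=
  let n : Int := (lst.length : Int)
  let rev : List String := (PySem.List.slice? lst none none (-1)).getD []
  (PySem.List.dedup lst).map (fun e =>
    (e, [("start", (((PySem.List.index? lst e).getD 0 : Nat) : Int)),
         ("end", n - 1 - (((PySem.List.index? rev e).getD 0 : Nat) : Int))]))

-- ===== PRECONDITION & SPEC =====
def Spec_find_start_end_indices (lst : List String) (out : List (String × List (String × Int))) : Prop := out = find_start_end_indices_alt lst
instance (lst : List String) (out : List (String × List (String × Int))) : Decidable (Spec_find_start_end_indices lst out) := by unfold Spec_find_start_end_indices; infer_instance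

-- ===== CLAIM =====
def Claim_equal_find_start_end_indices : Prop := ∀ (lst : List String), Dom_find_start_end_indices lst → Spec_find_start_end_indices lst (find_start_end_indices lst)

-- ===== LEMMAS AND PROOFS =====

-- first-occurrence index of e in lst, as B computes it
def pvFI (lst : List String) (e : String) : Int := (((PySem.List.index? lst e).getD 0 : Nat) : Int)
-- last-occurrence index of e in lst, as B computes it (via the reversed list)
def pvLI (lst : List String) (e : String) : Int :=
  (lst.length : Int) - 1 - (((PySem.List.index? lst.reverse e).getD 0 : Nat) : Int)
-- the per-key entry both programs produce
def pvF (lst : List String) (e : String) : String × List (String × Int) :=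
  (e, [("start", pvFI lst e), ("end", pvLI lst e)])

theorem pv_vitems (i j : Int) :
    (((PySem.Dict.empty.insert "start" i).insert "end" j : PySem.Dict String Int)).items
      = [("start", i), ("end", j)] := rfl

theorem pv_vitems_overwrite (i j k : Int) :
    ((((PySem.Dict.empty.insert "start" i).insert "end" j : PySem.Dict String Int)).insert "end" k).items
      = [("start", i), ("end", k)] := rfl

theorem pv_dedup_append (t : List String) (x : String) :
    PySem.List.dedup (t ++ [x])
      = if x ∈ t then PySem.List.dedup t else PySem.List.dedup t ++ [x] := by
  simp only [PySem.List.dedup_eq_ofList, PySem.Set.ofList_eq_foldl, List.foldl_append,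
    List.foldl_cons, List.foldl_nil, PySem.Set.add]
  by_cases hx : x ∈ t
  · rw [if_pos, if_pos hx]
    rw [← PySem.Set.ofList_eq_foldl]
    simpa [List.contains_iff_mem] using (PySem.Set.mem_ofList t x).mpr hx
  · rw [if_neg, if_neg hx]
    rw [← PySem.Set.ofList_eq_foldl]
    simpa [List.contains_iff_mem] using fun h => hx ((PySem.Set.mem_ofList t x).mp h)

theorem pv_fi_append_mem (t : List String) (x e : String) (he : e ∈ t) :
    pvFI (t ++ [x]) e = pvFI t e := by
  unfold pvFI
  rw [PySem.List.index?_append_of_mem _ he]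

theorem pv_fi_append_self (t : List String) (x : String) (hx : x ∉ t) :
    pvFI (t ++ [x]) x = (t.length : Int) := by
  unfold pvFI
  rw [PySem.List.index?_append_singleton_self t x hx]
  rfl

theorem pv_li_append_self (t : List String) (x : String) :
    pvLI (t ++ [x]) x = (t.length : Int) := by
  unfold pvLI
  rw [List.reverse_append]
  simp only [List.reverse_singleton, List.singleton_append, PySem.List.index?_cons_self,
    Option.getD_some, List.length_append, List.length_singleton]
  push_cast
  ring

theorem pv_li_append_ne (t : List String) (x e : String) (he : e ∈ t) (hne : e ≠ x) :
    pvLI (t ++ [x]) e = pvLI t e := by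
  unfold pvLI
  obtain ⟨k, hk⟩ : ∃ k, PySem.List.index? t.reverse e = some k := by
    have : (PySem.List.index? t.reverse e).isSome := by
      rw [PySem.List.index?_isSome_iff]; simpa using he
    exact Option.isSome_iff_exists.mp this
  rw [List.reverse_append]
  simp only [List.reverse_singleton, List.singleton_append]
  rw [PySem.List.index?_cons_of_ne t.reverse (Ne.symm hne), hk]
  simp only [Option.map_some, Option.getD_some, List.length_append, List.length_singleton]
  push_cast
  ring

-- the invariant: A's loop result, read as an association list, is B's map over the dedup
theorem pv_items (lst : List String) :
    (((PySem.List.enumerate lst).foldl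
        (fun d p =>
          if !(d.contains p.2) then
            d.insert p.2 ((PySem.Dict.empty.insert "start" p.1).insert "end" p.1)
          else
            d.modify p.2 PySem.Dict.empty (fun v => v.insert "end" p.1))
        (PySem.Dict.empty : PySem.Dict String (PySem.Dict String Int))).items).map
      (fun q => (q.1, q.2.items))
      = (PySem.List.dedup lst).map (pvF lst) := by
  induction lst using List.reverseRecOn with
  | nil => rfl
  | append_singleton t x ih =>
    rw [PySem.List.enumerate_append, List.foldl_append]
    simp only [PySem.List.enumerate, List.foldl_cons, List.foldl_nil, zero_add]
    set d := ((PySem.List.enumerate t).foldl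
        (fun d p =>
          if !(d.contains p.2) then
            d.insert p.2 ((PySem.Dict.empty.insert "start" p.1).insert "end" p.1)
          else
            d.modify p.2 PySem.Dict.empty (fun v => v.insert "end" p.1))
        (PySem.Dict.empty : PySem.Dict String (PySem.Dict String Int))) with hd
    have hkeys : d.keys = PySem.List.dedup t := by
      have h := congrArg (List.map Prod.fst) ih
      simp only [List.map_map] at h
      simpa [Function.comp_def, pvF, PySem.Dict.keys] using h
    have hnodup : d.keys.Nodup := by rw [hkeys]; exact PySem.List.nodup_dedup t
    have hcont : d.contains x = decide (x ∈ t) := by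
      rw [PySem.Dict.contains_eq_decide_mem_keys, hkeys]
      simp
    by_cases hx : x ∈ t
    · -- x already seen: A overwrites the 'end' field; B's dedup is unchanged
      rw [hcont, if_neg (by simp [hx])]
      obtain ⟨q, hq, hq1, hq2⟩ : ∃ q ∈ d.items, q.1 = x ∧ q.2.items
          = [("start", pvFI t x), ("end", pvLI t x)] := by
        have hmem : pvF t x ∈ (d.items).map (fun q => (q.1, q.2.items)) := by
          rw [ih]
          exact List.mem_map_of_mem (by simpa [PySem.List.mem_dedup] using hx)
        obtain ⟨q, hq, hgq⟩ := List.mem_map.mp hmem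
        exact ⟨q, hq, congrArg Prod.fst hgq, by
          have := congrArg Prod.snd hgq; simpa [pvF] using this⟩
      have hgetD : d.getD x PySem.Dict.empty
          = (PySem.Dict.empty.insert "start" (pvFI t x)).insert "end" (pvLI t x) := by
        have hqmem : (x, q.2) ∈ d.items := by rw [← hq1]; exact hq
        rw [PySem.Dict.getD_of_mem_items d hqmem hnodup]
        exact PySem.Dict.ext (by rw [hq2, pv_vitems])
      unfold PySem.Dict.modify
      rw [hgetD]
      rw [PySem.Dict.items_insert_of_contains _ _ (by rw [hcont]; simpa using hx)]
      rw [List.map_map]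
      have hpt : ∀ p : String × PySem.Dict String Int,
          ((fun q : String × PySem.Dict String Int => (q.1, q.2.items)) ∘
            (fun p => if p.1 == x then
              (x, ((PySem.Dict.empty.insert "start" (pvFI t x)).insert "end"
                    (pvLI t x)).insert "end" (t.length : Int)) else p)) p
          = (fun r : String × List (String × Int) =>
              if r.1 == x then (x, [("start", pvFI t x), ("end", (t.length : Int))]) else r)
              ((fun q : String × PySem.Dict String Int => (q.1, q.2.items)) p) := by
        intro p
        by_cases hp : p.1 == x
        · simp [Function.comp, hp, pv_vitems_overwrite]
        · simp [Function.comp, hp]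
      rw [List.map_congr_left (fun p _ => hpt p)]
      have key2 : List.map (fun p : String × PySem.Dict String Int =>
            (fun r : String × List (String × Int) =>
              if r.1 == x then (x, [("start", pvFI t x), ("end", (t.length : Int))]) else r)
              ((fun q : String × PySem.Dict String Int => (q.1, q.2.items)) p)) d.items
          = List.map (fun r : String × List (String × Int) =>
              if r.1 == x then (x, [("start", pvFI t x), ("end", (t.length : Int))]) else r)
              (List.map (fun q : String × PySem.Dict String Int => (q.1, q.2.items)) d.items) := by
        simp [Function.comp_def]
      rw [key2, ih, pv_dedup_append, if_pos hx, List.map_map]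
      apply List.map_congr_left
      intro e he
      have het : e ∈ t := (PySem.List.mem_dedup t e).mp he
      by_cases hex : e = x
      · subst hex
        simp [pvF, pv_fi_append_mem t e e het, pv_li_append_self]
      · simp [pvF, hex, pv_fi_append_mem t x e het,
          pv_li_append_ne t x e het hex]
    · -- x is new: A appends a fresh entry; B's dedup grows by x
      rw [hcont, if_pos (by simp [hx])]
      rw [PySem.Dict.items_insert_of_not_contains _ _ (by rw [hcont]; simpa using hx)]
      rw [List.map_append, ih, pv_dedup_append, if_neg hx, List.map_append]
      congr 1
      · apply List.map_congr_left
        intro e he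
        have het : e ∈ t := (PySem.List.mem_dedup t e).mp he
        have hex : e ≠ x := fun h => hx (h ▸ het)
        simp [pvF, pv_fi_append_mem t x e het, pv_li_append_ne t x e het hex]
      · simp [pvF, pv_vitems, pv_fi_append_self t x hx, pv_li_append_self]

-- ===== VERDICT =====
theorem find_start_end_indices_spec : Claim_equal_find_start_end_indices := by
  intro lst _
  unfold Spec_find_start_end_indices find_start_end_indices find_start_end_indices_alt
  rw [pv_items]
  simp only [PySem.List.slice?_none_none_neg_one, Option.getD_some]
  apply List.map_congr_left
  intro e _
  simp [pvF, pvFI, pvLI]
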